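-- pv_equiv track=rewrite | github.com/danielrosehill/AI-Text-Rewriting-Toolbox | app.py | categorize_prompts
-- ===== SOURCE A (Python) =====
-- def categorize_prompts(prompts_data):
--     categories = {
--         "General": [],
--         "Format Conversion": [],
--         "Style": [],
--         "Professional": [],
--         "Academic": [],
--         "Creative": [],
--         "Technical": [],
--         "Social Media": [],
--         "Prompting": [],
--         "Other": []
--     }
--
--     # Map prompts to categories based on keywords in name or description
--     for prompt_id, prompt_data in prompts_data.items():
--         name = prompt_data.get("name", "").lower()
--         description = prompt_data.get("description", "").lower()
--
--         if any(word in name or word in description for word in ["cleanup", "extract", "anonymization", "bullet", "summary"]):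
--             categories["General"].append((prompt_id, prompt_data.get("name", "Unknown")))
--         elif any(word in name or word in description for word in ["email", "letter", "minutes", "documentation", "status", "responder"]):
--             categories["Professional"].append((prompt_id, prompt_data.get("name", "Unknown")))
--         elif any(word in name or word in description for word in ["academic", "scientific", "paper"]):
--             categories["Academic"].append((prompt_id, prompt_data.get("name", "Unknown")))
--         elif any(word in name or word in description for word in ["blog", "social", "media"]):
--             categories["Social Media"].append((prompt_id, prompt_data.get("name", "Unknown")))
--         elif any(word in name or word in description for word in ["poetry", "poem", "shakespeare", "tolkien", "creative"]):
--             categories["Creative"].append((prompt_id, prompt_data.get("name", "Unknown")))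
--         elif any(word in name or word in description for word in ["code", "technical", "development", "software"]):
--             categories["Technical"].append((prompt_id, prompt_data.get("name", "Unknown")))
--         elif any(word in name or word in description for word in ["format", "convert", "transform"]):
--             categories["Format Conversion"].append((prompt_id, prompt_data.get("name", "Unknown")))
--         elif any(word in name or word in description for word in ["tone", "style", "formal", "casual"]):
--             categories["Style"].append((prompt_id, prompt_data.get("name", "Unknown")))
--         elif any(word in name or word in description for word in ["prompt", "chatgpt", "ai"]):
--             categories["Prompting"].append((prompt_id, prompt_data.get("name", "Unknown")))
--         else:
--             categories["Other"].append((prompt_id, prompt_data.get("name", "Unknown")))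
--
--     # Sort each category alphabetically by name
--     for category in categories:
--         categories[category].sort(key=lambda x: x[1])
--
--     return categories
-- ===== SOURCE B (Python) =====
-- RULES = [
--     ("General", ["cleanup", "extract", "anonymization", "bullet", "summary"]),
--     ("Professional", ["email", "letter", "minutes", "documentation", "status", "responder"]),
--     ("Academic", ["academic", "scientific", "paper"]),
--     ("Social Media", ["blog", "social", "media"]),
--     ("Creative", ["poetry", "poem", "shakespeare", "tolkien", "creative"]),
--     ("Technical", ["code", "technical", "development", "software"]),
--     ("Format Conversion", ["format", "convert", "transform"]),
--     ("Style", ["tone", "style", "formal", "casual"]),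
--     ("Prompting", ["prompt", "chatgpt", "ai"]),
-- ]
--
-- ORDER = ["General", "Format Conversion", "Style", "Professional", "Academic",
--          "Creative", "Technical", "Social Media", "Prompting", "Other"]
--
--
-- def _category(prompt_data):
--     name = prompt_data.get("name", "").lower()
--     description = prompt_data.get("description", "").lower()
--     for cat, words in RULES:
--         if any(word in name or word in description for word in words):
--             return cat
--     return "Other"
--
--
-- def categorize_prompts(prompts_data):
--     tagged = [(_category(pd), (pid, pd.get("name", "Unknown")))
--               for pid, pd in prompts_data.items()]
--     return {c: sorted((entry for cat, entry in tagged if cat == c), key=lambda x: x[1])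
--             for c in ORDER}
-- ===== Notes on version B (the rewrite author's own statement) =====
-- stated objective: simpler
-- what changed: Replaces the nine-branch elif chain appending into a mutable dict of buckets by a data-driven classification (an ordered rule table scanned for the first match) that tags each prompt once, and builds the result dict by filtering the tagged list per category.
import Mathlib
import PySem

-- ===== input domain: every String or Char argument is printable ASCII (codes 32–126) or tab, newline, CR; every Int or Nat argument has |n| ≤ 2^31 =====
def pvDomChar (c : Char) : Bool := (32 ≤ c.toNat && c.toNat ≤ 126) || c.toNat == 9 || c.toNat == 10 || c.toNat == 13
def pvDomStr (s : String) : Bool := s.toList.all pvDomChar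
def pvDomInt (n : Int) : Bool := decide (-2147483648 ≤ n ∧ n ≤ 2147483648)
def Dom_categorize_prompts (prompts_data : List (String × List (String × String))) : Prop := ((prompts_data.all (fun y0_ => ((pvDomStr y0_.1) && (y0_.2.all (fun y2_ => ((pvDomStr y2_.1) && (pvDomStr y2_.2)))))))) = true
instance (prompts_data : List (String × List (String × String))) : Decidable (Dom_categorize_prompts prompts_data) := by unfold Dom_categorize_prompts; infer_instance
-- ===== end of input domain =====

-- B replaces A's nine-branch elif chain appending into a mutable dict of buckets by a
-- first-match scan of an ordered rule table that tags each prompt once, building each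
-- category's list by filtering the tagged prompts (objective: simpler, data-driven).

-- ===== PORT A =====
def categorize_prompts (prompts_data : List (String × List (String × String))) : List (String × List (String × String)) :=
  let init : PySem.Dict String (List (String × String)) :=
    PySem.Dict.ofList [("General", []), ("Format Conversion", []), ("Style", []),
      ("Professional", []), ("Academic", []), ("Creative", []), ("Technical", []),
      ("Social Media", []), ("Prompting", []), ("Other", [])]
  let d := prompts_data.foldl (fun cats x =>
    let pd := PySem.Dict.mk x.2
    let name := PySem.Str.lower (pd.getD "name" "")
    let description := PySem.Str.lower (pd.getD "description" "")
    let entry := (x.1, pd.getD "name" "Unknown")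
    if ["cleanup", "extract", "anonymization", "bullet", "summary"].any
        (fun w => PySem.Str.isIn w name || PySem.Str.isIn w description) then
      cats.modify "General" [] (· ++ [entry])
    else if ["email", "letter", "minutes", "documentation", "status", "responder"].any
        (fun w => PySem.Str.isIn w name || PySem.Str.isIn w description) then
      cats.modify "Professional" [] (· ++ [entry])
    else if ["academic", "scientific", "paper"].any
        (fun w => PySem.Str.isIn w name || PySem.Str.isIn w description) then
      cats.modify "Academic" [] (· ++ [entry])
    else if ["blog", "social", "media"].any
        (fun w => PySem.Str.isIn w name || PySem.Str.isIn w description) then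
      cats.modify "Social Media" [] (· ++ [entry])
    else if ["poetry", "poem", "shakespeare", "tolkien", "creative"].any
        (fun w => PySem.Str.isIn w name || PySem.Str.isIn w description) then
      cats.modify "Creative" [] (· ++ [entry])
    else if ["code", "technical", "development", "software"].any
        (fun w => PySem.Str.isIn w name || PySem.Str.isIn w description) then
      cats.modify "Technical" [] (· ++ [entry])
    else if ["format", "convert", "transform"].any
        (fun w => PySem.Str.isIn w name || PySem.Str.isIn w description) then
      cats.modify "Format Conversion" [] (· ++ [entry])
    else if ["tone", "style", "formal", "casual"].any
        (fun w => PySem.Str.isIn w name || PySem.Str.isIn w description) then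
      cats.modify "Style" [] (· ++ [entry])
    else if ["prompt", "chatgpt", "ai"].any
        (fun w => PySem.Str.isIn w name || PySem.Str.isIn w description) then
      cats.modify "Prompting" [] (· ++ [entry])
    else
      cats.modify "Other" [] (· ++ [entry])) init
  (d.keys.foldl (fun cats c =>
      cats.modify c [] (fun v => PySem.List.sorted v (fun x => x.2) false)) d).items

-- ===== PORT B =====
def pvRules : List (String × List String) :=
  [("General", ["cleanup", "extract", "anonymization", "bullet", "summary"]),
   ("Professional", ["email", "letter", "minutes", "documentation", "status", "responder"]),
   ("Academic", ["academic", "scientific", "paper"]),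
   ("Social Media", ["blog", "social", "media"]),
   ("Creative", ["poetry", "poem", "shakespeare", "tolkien", "creative"]),
   ("Technical", ["code", "technical", "development", "software"]),
   ("Format Conversion", ["format", "convert", "transform"]),
   ("Style", ["tone", "style", "formal", "casual"]),
   ("Prompting", ["prompt", "chatgpt", "ai"])]

def pvOrder : List String :=
  ["General", "Format Conversion", "Style", "Professional", "Academic",
   "Creative", "Technical", "Social Media", "Prompting", "Other"]

def pvFirstCat : List (String × List String) → String → String → String
  | [], _, _ => "Other"
  | (c, ws) :: rs, name, description =>
    if ws.any (fun w => PySem.Str.isIn w name || PySem.Str.isIn w description) then c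
    else pvFirstCat rs name description

def pvCategory (pd : List (String × String)) : String :=
  let name := PySem.Str.lower ((PySem.Dict.mk pd).getD "name" "")
  let description := PySem.Str.lower ((PySem.Dict.mk pd).getD "description" "")
  pvFirstCat pvRules name description

def categorize_prompts_alt (prompts_data : List (String × List (String × String))) : List (String × List (String × String)) :=
  let tagged := prompts_data.map (fun x =>
    (pvCategory x.2, (x.1, (PySem.Dict.mk x.2).getD "name" "Unknown")))
  pvOrder.map (fun c =>
    (c, PySem.List.sorted ((tagged.filter (fun t => t.1 == c)).map (fun t => t.2))
          (fun x => x.2) false))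

-- ===== PRECONDITION & SPEC =====
def Spec_categorize_prompts (prompts_data : List (String × List (String × String))) (out : List (String × List (String × String))) : Prop := out = categorize_prompts_alt prompts_data
instance (prompts_data : List (String × List (String × String))) (out : List (String × List (String × String))) : Decidable (Spec_categorize_prompts prompts_data out) := by unfold Spec_categorize_prompts; infer_instance

-- ===== CLAIM (what is proved, stated in full; the proofs are below) =====
def Claim_equal_categorize_prompts : Prop := ∀ (prompts_data : List (String × List (String × String))), Dom_categorize_prompts prompts_data → Spec_categorize_prompts prompts_data (categorize_prompts prompts_data)

-- ===== LEMMAS AND PROOFS =====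

-- A's elif chain, as one dict update keyed by B's first-matching-rule category.
set_option maxHeartbeats 1000000 in
theorem pv_stepA_eq (cats : PySem.Dict String (List (String × String)))
    (x : String × List (String × String)) :
    (let pd := PySem.Dict.mk x.2
     let name := PySem.Str.lower (pd.getD "name" "")
     let description := PySem.Str.lower (pd.getD "description" "")
     let entry := (x.1, pd.getD "name" "Unknown")
     if ["cleanup", "extract", "anonymization", "bullet", "summary"].any
         (fun w => PySem.Str.isIn w name || PySem.Str.isIn w description) then
       cats.modify "General" [] (· ++ [entry])
     else if ["email", "letter", "minutes", "documentation", "status", "responder"].any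
         (fun w => PySem.Str.isIn w name || PySem.Str.isIn w description) then
       cats.modify "Professional" [] (· ++ [entry])
     else if ["academic", "scientific", "paper"].any
         (fun w => PySem.Str.isIn w name || PySem.Str.isIn w description) then
       cats.modify "Academic" [] (· ++ [entry])
     else if ["blog", "social", "media"].any
         (fun w => PySem.Str.isIn w name || PySem.Str.isIn w description) then
       cats.modify "Social Media" [] (· ++ [entry])
     else if ["poetry", "poem", "shakespeare", "tolkien", "creative"].any
         (fun w => PySem.Str.isIn w name || PySem.Str.isIn w description) then
       cats.modify "Creative" [] (· ++ [entry])
     else if ["code", "technical", "development", "software"].any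
         (fun w => PySem.Str.isIn w name || PySem.Str.isIn w description) then
       cats.modify "Technical" [] (· ++ [entry])
     else if ["format", "convert", "transform"].any
         (fun w => PySem.Str.isIn w name || PySem.Str.isIn w description) then
       cats.modify "Format Conversion" [] (· ++ [entry])
     else if ["tone", "style", "formal", "casual"].any
         (fun w => PySem.Str.isIn w name || PySem.Str.isIn w description) then
       cats.modify "Style" [] (· ++ [entry])
     else if ["prompt", "chatgpt", "ai"].any
         (fun w => PySem.Str.isIn w name || PySem.Str.isIn w description) then
       cats.modify "Prompting" [] (· ++ [entry])
     else
       cats.modify "Other" [] (· ++ [entry]))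
    = cats.modify (pvCategory x.2) []
        (· ++ [(x.1, (PySem.Dict.mk x.2).getD "name" "Unknown")]) := by
  simp only [pvCategory, pvFirstCat, pvRules]
  split_ifs <;> rfl

theorem pvFirstCat_mem (rs : List (String × List String)) (n d : String) :
    pvFirstCat rs n d ∈ rs.map Prod.fst ++ ["Other"] := by
  induction rs with
  | nil => simp [pvFirstCat]
  | cons r rs ih =>
    obtain ⟨c, ws⟩ := r
    simp only [pvFirstCat]
    split
    · simp
    · simpa using .inr (by simpa using ih)

theorem pvCategory_mem (pd : List (String × String)) : pvCategory pd ∈ pvOrder := by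
  unfold pvCategory
  have h := pvFirstCat_mem pvRules (PySem.Str.lower ((PySem.Dict.mk pd).getD "name" ""))
    (PySem.Str.lower ((PySem.Dict.mk pd).getD "description" ""))
  have sub : ∀ x : String, x ∈ pvRules.map Prod.fst ++ ["Other"] → x ∈ pvOrder := by
    intro x hx
    fin_cases hx <;> decide
  exact sub _ h

theorem pv_set_update_self (s xs : List String) (h : ∀ x ∈ xs, x ∈ s) :
    PySem.Set.update s xs = s := by
  rw [PySem.Set.update_eq_append_filter]
  have : (PySem.Set.ofList xs).filter (fun y => !(PySem.Set.contains s y)) = [] := by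
    rw [List.filter_eq_nil_iff]
    intro y hy
    have hys : y ∈ s := h y ((PySem.Set.mem_ofList xs y).1 hy)
    simp [PySem.Set.contains, hys]
  rw [this, List.append_nil]

theorem pv_sortFold_getD (f : List (String × String) → List (String × String))
    (ks : List String) (d : PySem.Dict String (List (String × String)))
    (k : String) (hnd : ks.Nodup) :
    ((ks.foldl (fun cats c => cats.modify c [] f) d).getD k []) =
      if k ∈ ks then f (d.getD k []) else d.getD k [] := by
  induction ks generalizing d with
  | nil => simp
  | cons c ks ih =>
    simp only [List.foldl_cons]
    rw [ih _ hnd.of_cons]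
    by_cases hk : k = c
    · subst hk
      have : k ∉ ks := by simpa using (List.nodup_cons.1 hnd).1
      simp [this, PySem.Dict.getD_modify_self]
    · rw [PySem.Dict.getD_modify_of_ne d [] f hk]
      simp [hk]

theorem pv_main (l : List (String × List (String × String)))
    (d0 : PySem.Dict String (List (String × String)))
    (hkeys0 : d0.keys = pvOrder)
    (hgetD0 : ∀ k ∈ pvOrder, d0.getD k [] = []) :
    (let d := l.foldl (fun cats x =>
        cats.modify (pvCategory x.2) []
          (· ++ [(x.1, (PySem.Dict.mk x.2).getD "name" "Unknown")])) d0
     (d.keys.foldl (fun cats c =>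
        cats.modify c [] (fun v => PySem.List.sorted v (fun x => x.2) false)) d).items)
    = pvOrder.map (fun c =>
        (c, PySem.List.sorted
              (((l.map (fun x =>
                   (pvCategory x.2, (x.1, (PySem.Dict.mk x.2).getD "name" "Unknown")))).filter
                  (fun t => t.1 == c)).map (fun t => t.2))
              (fun x => x.2) false)) := by
  have hOrderNodup : pvOrder.Nodup := by decide
  have hfold : l.foldl (fun cats x =>
        cats.modify (pvCategory x.2) []
          (· ++ [(x.1, (PySem.Dict.mk x.2).getD "name" "Unknown")])) d0
      = (l.map (fun x =>
           (pvCategory x.2, (x.1, (PySem.Dict.mk x.2).getD "name" "Unknown")))).foldl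
          (fun d p => d.modify p.1 [] (· ++ [p.2])) d0 := by
    rw [List.foldl_map]
  set tagged := l.map (fun x =>
      (pvCategory x.2, (x.1, (PySem.Dict.mk x.2).getD "name" "Unknown"))) with htagged
  set dF := l.foldl (fun cats x =>
      cats.modify (pvCategory x.2) []
        (· ++ [(x.1, (PySem.Dict.mk x.2).getD "name" "Unknown")])) d0 with hdF
  have hkeysF : dF.keys = pvOrder := by
    rw [hdF, PySem.Dict.keys_foldl_modify_key l (fun x => pvCategory x.2) []
      (fun _ x => (· ++ [(x.1, (PySem.Dict.mk x.2).getD "name" "Unknown")])) d0, hkeys0]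
    exact pv_set_update_self _ _ (by
      intro c hc
      obtain ⟨x, _, rfl⟩ := List.mem_map.1 hc
      exact pvCategory_mem x.2)
  have hgetDF : ∀ k, dF.getD k [] = d0.getD k [] ++ (tagged.filter (fun t => t.1 == k)).map (fun t => t.2) := by
    intro k
    rw [hfold]
    exact PySem.Dict.getD_foldl_modify_append _ _ _
  set dS := dF.keys.foldl (fun cats c =>
      cats.modify c [] (fun v => PySem.List.sorted v (fun x => x.2) false)) dF with hdS
  have hkeysS : dS.keys = pvOrder := by
    rw [hdS, PySem.Dict.keys_foldl_modify dF.keys []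
      (fun _ _ => (fun v => PySem.List.sorted v (fun x => x.2) false)) dF, hkeysF]
    exact pv_set_update_self _ _ (fun x hx => hx)
  have hnodupS : dS.keys.Nodup := hkeysS ▸ hOrderNodup
  have hitems : dS.items = dS.keys.map (fun k => (k, dS.getD k [])) :=
    PySem.Dict.items_eq_map_keys dS hnodupS []
  show dS.items = _
  rw [hitems, hkeysS]
  apply List.map_congr_left
  intro k hk
  have hgs : dS.getD k [] = PySem.List.sorted (dF.getD k []) (fun x => x.2) false := by
    rw [hdS, pv_sortFold_getD _ _ _ _ (hkeysF ▸ hOrderNodup), hkeysF]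
    simp [hk]
  rw [hgs, hgetDF k, hgetD0 k hk, List.nil_append]

-- ===== VERDICT (by name: the statement is the Claim_ definition above) =====
theorem categorize_prompts_spec : Claim_equal_categorize_prompts := by
  intro l _
  unfold Spec_categorize_prompts categorize_prompts categorize_prompts_alt
  simp only [pv_stepA_eq]
  exact pv_main l _ (by decide) (by intro k hk; fin_cases hk <;> rfl)
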